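-- pv_equiv track=rewrite | github.com/RameelHaroon/Arbi | Arbi_2022_Q1/Arbi_2022_Q1.py | group_timelines
-- ===== SOURCE A (Python) =====
-- def group_timelines(timeLines, masks):
--
--     tempGroupedTimelines = {}
--
--     for index,timeLine in enumerate(timeLines):
--
--         if masks[index] in tempGroupedTimelines:
--             # if the mask exists,just append the new value with same mask
--             tempGroupedTimelines[masks[index]].append(timeLine)
--
--         else:
--             # if not, then make a new entry in the tempGroupedTimelines
--             tempGroupedTimelines[masks[index]] = [timeLine]
--
--     return tempGroupedTimelines
-- ===== SOURCE B (Python) =====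
-- def group_timelines(timeLines, masks):
--     pairs = list(zip(timeLines, masks))
--     order = list(dict.fromkeys(m for _, m in pairs))
--     return {m: [t for t, mm in pairs if mm == m] for m in order}
-- ===== Notes on version B (the rewrite author's own statement) =====
-- stated objective: alternative
-- what changed: Replaces A's single incremental dict-building pass (membership test + append/new-entry per element) by first computing the distinct masks in first-appearance order and then building each group with an independent filtering scan over the zipped pairs.
import Mathlib
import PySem

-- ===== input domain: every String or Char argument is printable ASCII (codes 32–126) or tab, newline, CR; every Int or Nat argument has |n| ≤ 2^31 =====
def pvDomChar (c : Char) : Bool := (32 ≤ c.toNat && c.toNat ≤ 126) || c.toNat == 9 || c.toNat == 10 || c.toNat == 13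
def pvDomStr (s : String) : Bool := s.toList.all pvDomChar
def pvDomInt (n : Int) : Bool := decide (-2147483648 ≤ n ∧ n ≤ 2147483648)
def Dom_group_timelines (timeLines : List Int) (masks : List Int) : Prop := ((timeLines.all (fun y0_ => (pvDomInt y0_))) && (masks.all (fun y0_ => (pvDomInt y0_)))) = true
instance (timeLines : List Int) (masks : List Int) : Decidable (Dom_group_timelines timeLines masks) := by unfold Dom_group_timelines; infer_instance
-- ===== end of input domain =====

-- B replaces A's incremental dict-building pass by an outer iteration over the distinct masks
-- (first-appearance order) with an inner filtering scan per key (objective: alternative).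


-- ===== PORT A =====
-- masks[index] is read with a default; Pre_ guarantees index < masks.length, so it is exact there.
def group_timelines (timeLines : List Int) (masks : List Int) : List (Int × List Int) :=
  ((PySem.List.enumerate timeLines).foldl
    (fun (d : PySem.Dict Int (List Int)) (p : Int × Int) =>
      let mk := PySem.List.pyGetD masks p.1 0
      if d.contains mk then d.insert mk (d.getD mk [] ++ [p.2])
      else d.insert mk [p.2])
    PySem.Dict.empty).items

-- ===== PORT B =====
def group_timelines_alt (timeLines : List Int) (masks : List Int) : List (Int × List Int) :=
  let pairs := timeLines.zip masks
  let order := PySem.List.dedup (pairs.map Prod.snd)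
  order.map (fun m => (m, (pairs.filter (fun p => p.2 == m)).map Prod.fst))

-- ===== PRECONDITION & SPEC =====
-- A raises IndexError on masks[index] when masks is shorter than timeLines; exactly those inputs are excluded.
def Pre_group_timelines (timeLines : List Int) (masks : List Int) : Prop :=
  timeLines.length ≤ masks.length
instance (timeLines : List Int) (masks : List Int) : Decidable (Pre_group_timelines timeLines masks) := by unfold Pre_group_timelines; infer_instance
def pvWitness_group_timelines : List Int × List Int := ([1, 2, 3, 4], [7, -2, 7, 9])

def Spec_group_timelines (timeLines : List Int) (masks : List Int) (out : List (Int × List Int)) : Prop := out = group_timelines_alt timeLines masks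
instance (timeLines : List Int) (masks : List Int) (out : List (Int × List Int)) : Decidable (Spec_group_timelines timeLines masks out) := by unfold Spec_group_timelines; infer_instance

-- ===== CLAIM (what is proved, stated in full; the proofs are below) =====
def Claim_equal_group_timelines : Prop := ∀ (timeLines : List Int) (masks : List Int), Dom_group_timelines timeLines masks → Pre_group_timelines timeLines masks → Spec_group_timelines timeLines masks (group_timelines timeLines masks)

-- ===== LEMMAS AND PROOFS =====

theorem getElem_enum {α : Type} (xs : List α) (s : Int) (i : Nat) (h : i < xs.length) :
    (PySem.List.enumerate xs s)[i]'(by simpa using h) = (s + i, xs[i]) := by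
  induction xs generalizing s i with
  | nil => simp at h
  | cons x t ih =>
    cases i with
    | zero => simp [PySem.List.enumerate_cons]
    | succ j =>
      have := ih (s+1) j (by simpa using Nat.lt_of_succ_lt_succ h)
      simp [PySem.List.enumerate_cons, this]
      ring

theorem enum_pyGetD_eq_zip (tl ms : List Int) (h : tl.length ≤ ms.length) :
    (PySem.List.enumerate tl).map (fun p => (PySem.List.pyGetD ms p.1 0, p.2)) = ms.zip tl := by
  apply List.ext_getElem
  · simp; omega
  · intro i h1 h2
    simp only [List.getElem_map, List.getElem_zip]
    have hi : i < tl.length := by simp at h1; omega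
    rw [getElem_enum tl 0 i hi]
    simp only [zero_add]
    rw [PySem.List.pyGetD_eq_getElem ms 0 (by positivity) (by exact_mod_cast by omega)]
    simp

theorem body_eq_modify (d : PySem.Dict Int (List Int)) (k v : Int) :
    (if d.contains k then d.insert k (d.getD k [] ++ [v]) else d.insert k [v])
      = d.modify k [] (· ++ [v]) := by
  by_cases h : d.contains k
  · simp [h, PySem.Dict.modify]
  · simp only [Bool.not_eq_true] at h
    simp [h, PySem.Dict.modify, PySem.Dict.getD_of_not_contains d ([] : List Int) h]

theorem group_timelines_spec : Claim_equal_group_timelines := by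
  intro tl ms _ hpre
  unfold Pre_group_timelines at hpre
  unfold Spec_group_timelines group_timelines group_timelines_alt
  have hbody : (fun (d : PySem.Dict Int (List Int)) (p : Int × Int) =>
        let mk := PySem.List.pyGetD ms p.1 0
        if d.contains mk then d.insert mk (d.getD mk [] ++ [p.2])
        else d.insert mk [p.2])
      = (fun d p => d.modify (PySem.List.pyGetD ms p.1 0) [] (· ++ [p.2])) := by
    funext d p; exact body_eq_modify d _ p.2
  rw [hbody]
  have hfold : (PySem.List.enumerate tl).foldl
      (fun (d : PySem.Dict Int (List Int)) p => d.modify (PySem.List.pyGetD ms p.1 0) [] (· ++ [p.2]))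
      PySem.Dict.empty
    = (ms.zip tl).foldl (fun d q => d.modify q.1 [] (· ++ [q.2])) PySem.Dict.empty := by
    rw [← enum_pyGetD_eq_zip tl ms hpre, List.foldl_map]
  rw [hfold]
  set D := (ms.zip tl).foldl (fun (d : PySem.Dict Int (List Int)) q => d.modify q.1 [] (· ++ [q.2])) PySem.Dict.empty with hD
  have hnd : D.keys.Nodup := by
    apply PySem.Dict.nodup_keys_foldl_modify_key (ms.zip tl) Prod.fst [] (fun _ q v => v ++ [q.2])
    simp [PySem.Dict.keys_empty]
  have hkeys : D.keys = PySem.List.dedup ((tl.zip ms).map Prod.snd) := by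
    rw [hD, PySem.Dict.keys_foldl_modify_key (ms.zip tl) Prod.fst [] (fun _ q v => v ++ [q.2])]
    rw [PySem.Dict.keys_empty, PySem.Set.update_nil_left, PySem.List.dedup_eq_ofList]
    congr 1
    rw [← List.zip_swap tl ms, List.map_map]
    rfl
  rw [PySem.Dict.items_eq_map_keys D hnd [], hkeys]
  apply List.map_congr_left
  intro m _
  have hg : D.getD m [] = ((tl.zip ms).filter (fun p => p.2 == m)).map Prod.fst := by
    rw [hD, PySem.Dict.getD_foldl_modify_append (ms.zip tl) PySem.Dict.empty m]
    rw [PySem.Dict.getD_empty, List.nil_append]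
    rw [← List.zip_swap tl ms, List.filter_map, List.map_map]
    rfl
  rw [hg]
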